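-- pv_equiv track=rewrite | github.com/wpedrak/advent_of_code_2017 | 09/solution2.py | count_garbage_chars
-- ===== SOURCE A (Python) =====
-- IN_GROUP = 'IN_GROUP'
--
-- IN_GARBAGE = 'IN_GARBAGE'
--
-- def count_garbage_chars(stream):
--     state = IN_GROUP
--     skip_next = False
--     garbage_chars = 0
--
--     for char in stream:
--         if skip_next:
--             skip_next = False
--             continue
--
--         if state == IN_GARBAGE:
--             if char == '!':
--                 skip_next = True
--                 continue
--             if char == '>':
--                 state = IN_GROUP
--                 continue
--
--             garbage_chars += 1
--
--         if state == IN_GROUP: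
--             if char == '<':
--                 state = IN_GARBAGE
--                 continue
--
--     return garbage_chars
-- ===== SOURCE B (Python) =====
-- def count_garbage_chars(stream):
--     n = len(stream)
--     i = 0
--     count = 0
--     while i < n:
--         if stream[i] == '<':
--             i += 1
--             while i < n and stream[i] != '>':
--                 if stream[i] == '!':
--                     i += 2
--                 else:
--                     count += 1
--                     i += 1
--             i += 1
--         else:
--             i += 1
--     return count
-- ===== Notes on version B (the rewrite author's own statement) =====
-- stated objective: alternative
-- what changed: Replaced the flat state machine (state string + skip_next flag folded over every char) by an index-based pair of nested while loops: an outer scan that jumps into an inner garbage loop which skips escaped chars by advancing the index by 2.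
import Mathlib
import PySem

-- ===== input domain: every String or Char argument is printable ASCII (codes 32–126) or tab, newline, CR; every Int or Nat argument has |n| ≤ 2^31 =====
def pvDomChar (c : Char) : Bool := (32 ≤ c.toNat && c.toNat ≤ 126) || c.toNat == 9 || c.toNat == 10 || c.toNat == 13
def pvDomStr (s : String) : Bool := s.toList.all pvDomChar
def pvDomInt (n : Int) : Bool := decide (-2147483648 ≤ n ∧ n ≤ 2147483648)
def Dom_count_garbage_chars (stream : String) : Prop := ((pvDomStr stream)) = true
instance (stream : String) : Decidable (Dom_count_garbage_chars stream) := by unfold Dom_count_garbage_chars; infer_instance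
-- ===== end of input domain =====

-- B replaces A's flat state machine (state string + skip_next flag) by nested loops that
-- jump into a garbage loop and skip escapes by advancing two positions (objective: alternative).

-- ===== PORT A =====
-- one step of A's for-loop over (state, skip_next, garbage_chars)
def cgcStep (st : String × Bool × Int) (c : Char) : String × Bool × Int :=
  if st.2.1 then (st.1, false, st.2.2)
  else if st.1 == "IN_GARBAGE" then
    if c == '!' then (st.1, true, st.2.2)
    else if c == '>' then ("IN_GROUP", st.2.1, st.2.2)
    else (st.1, st.2.1, st.2.2 + 1)
  else
    if c == '<' then ("IN_GARBAGE", st.2.1, st.2.2)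
    else (st.1, st.2.1, st.2.2)

def count_garbage_chars (stream : String) : Int :=
  (stream.toList.foldl cgcStep ("IN_GROUP", false, 0)).2.2

-- ===== PORT B =====
-- B's outer while loop (outside garbage) and inner while loop (inside garbage),
-- over the remaining characters (index advance = dropping from the front).
mutual
def cgcOut : List Char → Int
  | [] => 0
  | c :: rest => if c == '<' then cgcIn rest else cgcOut rest
  termination_by l => l.length
def cgcIn : List Char → Int
  | [] => 0
  | c :: rest =>
    if c == '!' then cgcIn rest.tail          -- i += 2
    else if c == '>' then cgcOut rest         -- step past '>'
    else 1 + cgcIn rest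
  termination_by l => l.length
  decreasing_by all_goals simp [List.length_tail] <;> omega
end

def count_garbage_chars_alt (stream : String) : Int := cgcOut stream.toList

-- ===== PRECONDITION & SPEC =====
def Spec_count_garbage_chars (stream : String) (out : Int) : Prop := out = count_garbage_chars_alt stream
instance (stream : String) (out : Int) : Decidable (Spec_count_garbage_chars stream out) := by unfold Spec_count_garbage_chars; infer_instance

-- ===== CLAIM (what is proved, stated in full; the proofs are below) =====
def Claim_equal_count_garbage_chars : Prop := ∀ (stream : String), Dom_count_garbage_chars stream → Spec_count_garbage_chars stream (count_garbage_chars stream)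

-- ===== LEMMAS AND PROOFS =====

theorem cgc_fold_inv (l : List Char) : ∀ cnt : Int,
    (l.foldl cgcStep ("IN_GROUP", false, cnt)).2.2 = cnt + cgcOut l
    ∧ (l.foldl cgcStep ("IN_GARBAGE", false, cnt)).2.2 = cnt + cgcIn l
    ∧ (l.foldl cgcStep ("IN_GARBAGE", true, cnt)).2.2 = cnt + cgcIn l.tail := by
  induction l with
  | nil => intro cnt; simp [cgcOut, cgcIn]
  | cons c rest ih =>
    intro cnt
    refine ⟨?_, ?_, ?_⟩
    · by_cases h : c = '<' <;>
        simp [List.foldl_cons, cgcStep, h, cgcOut, (ih cnt).1, (ih cnt).2.1]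
    · by_cases h1 : c = '!'
      · simp [List.foldl_cons, cgcStep, h1, cgcIn, (ih cnt).2.2]
      · by_cases h2 : c = '>'
        · simp [List.foldl_cons, cgcStep, h2, cgcIn, (ih cnt).1]
        · simp [List.foldl_cons, cgcStep, h1, h2, cgcIn, (ih (cnt + 1)).2.1]
          ring
    · simp [List.foldl_cons, cgcStep, (ih cnt).2.1]

-- ===== VERDICT (by name: the statement is the Claim_ definition above) =====
theorem count_garbage_chars_spec : Claim_equal_count_garbage_chars := by
  intro stream _
  unfold Spec_count_garbage_chars count_garbage_chars count_garbage_chars_alt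
  simpa using (cgc_fold_inv stream.toList 0).1
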